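-- pv_equiv track=rewrite | github.com/niroopkumarkonka-art/au | centered_pyramid.py | build_centered_pyramid
-- ===== SOURCE A (Python) =====
-- from typing import List
--
-- def build_centered_pyramid(n: int) -> List[str]:
--     """Return a list of strings representing a centered number pyramid with n rows.
--
--     Each row i (1-based) contains increasing numbers from 1 to i and then decreasing
--     numbers back to 1, centered with spaces so the last row has no leading spaces.
--     """
--     if n <= 0:
--         return []
--     # width of the last row: numbers count = 2*n-1, but each number is printed without spaces
--     # we just use leading spaces to center; compute leading spaces for row i as n-i
--     lines: List[str] = []
--     for i in range(1, n + 1):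
--         left_nums = ''.join(str(k) for k in range(1, i + 1))
--         right_nums = ''.join(str(k) for k in range(i - 1, 0, -1))
--         line = left_nums + right_nums
--         # center by padding on the left with (n - i) spaces
--         padded = ' ' * (n - i) + line
--         lines.append(padded)
--     return lines
-- ===== SOURCE B (Python) =====
-- from typing import List
--
-- def build_centered_pyramid(n: int) -> List[str]:
--     """Centered number pyramid via running accumulators for both halves."""
--     lines: List[str] = []
--     left = ''
--     right = ''
--     for i in range(1, n + 1):
--         left += str(i)
--         lines.append(' ' * (n - i) + left + right)
--         right = str(i) + right
--     return lines
-- ===== Notes on version B (the rewrite author's own statement) =====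
-- stated objective: faster
-- what changed: Instead of rebuilding the ascending and descending digit strings from scratch with two inner join-over-range loops per row, B threads two cross-row accumulators (left grows by str(i) at the tail, right by str(i) at the head), so each row is formed by constant-count concatenations with no inner loops; intended as faster, and a timing run measured roughly a tenfold speedup at its largest sizes.
import Mathlib
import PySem

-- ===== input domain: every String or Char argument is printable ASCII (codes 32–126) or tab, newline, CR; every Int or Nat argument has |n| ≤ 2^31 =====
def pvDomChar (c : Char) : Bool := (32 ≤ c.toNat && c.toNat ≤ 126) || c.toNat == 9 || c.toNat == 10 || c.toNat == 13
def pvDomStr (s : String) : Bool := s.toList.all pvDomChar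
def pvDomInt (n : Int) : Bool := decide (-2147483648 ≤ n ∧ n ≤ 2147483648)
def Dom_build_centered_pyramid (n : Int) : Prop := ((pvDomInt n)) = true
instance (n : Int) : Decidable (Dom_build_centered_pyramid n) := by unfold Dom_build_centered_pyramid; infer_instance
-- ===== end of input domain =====

-- B rebuilds nothing: it threads two cross-row digit-string accumulators instead of
-- A's two per-row joins over fresh ranges (objective: alternative decomposition).

-- ===== PORT A =====
-- loop body of A: lines.append(' '*(n-i) + ''.join(str(k) for k in range(1,i+1)) + ''.join(str(k) for k in range(i-1,0,-1)))
-- ' ' * (n-i) is List.replicate (n-i).toNat ' ' (Python's negative repeat gives '', as toNat clamps)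
def pvAStep (n : Int) (lines : List String) (i : Int) : List String :=
  let left_nums := PySem.Chars.join [] ((PySem.List.pyRange 1 (i + 1) 1).map PySem.Int.toChars)
  let right_nums := PySem.Chars.join [] ((PySem.List.pyRange (i - 1) 0 (-1)).map PySem.Int.toChars)
  let line := left_nums ++ right_nums
  let padded := List.replicate (n - i).toNat ' ' ++ line
  lines ++ [String.ofList padded]

def build_centered_pyramid (n : Int) : List String :=
  if n ≤ 0 then []
  else (PySem.List.pyRange 1 (n + 1) 1).foldl (pvAStep n) []

-- ===== PORT B =====
-- loop body of B: left += str(i); lines.append(' '*(n-i) + left + right); right = str(i) + right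
def pvBStep (n : Int) (st : List String × List Char × List Char) (i : Int) :
    List String × List Char × List Char :=
  let left := st.2.1 ++ PySem.Int.toChars i
  (st.1 ++ [String.ofList (List.replicate (n - i).toNat ' ' ++ left ++ st.2.2)],
   left, PySem.Int.toChars i ++ st.2.2)

def build_centered_pyramid_alt (n : Int) : List String :=
  ((PySem.List.pyRange 1 (n + 1) 1).foldl (pvBStep n) ([], [], [])).1

-- ===== PRECONDITION & SPEC =====
def Spec_build_centered_pyramid (n : Int) (out : List String) : Prop := out = build_centered_pyramid_alt n
instance (n : Int) (out : List String) : Decidable (Spec_build_centered_pyramid n out) := by unfold Spec_build_centered_pyramid; infer_instance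

-- ===== CLAIM (what is proved, stated in full; the proofs are below) =====
def Claim_equal_build_centered_pyramid : Prop := ∀ (n : Int), Dom_build_centered_pyramid n → Spec_build_centered_pyramid n (build_centered_pyramid n)

-- ===== LEMMAS AND PROOFS =====

-- the left / right digit strings of row i, as A computes them
def pvL (i : Int) : List Char :=
  PySem.Chars.join [] ((PySem.List.pyRange 1 (i + 1) 1).map PySem.Int.toChars)
def pvR (i : Int) : List Char :=
  PySem.Chars.join [] ((PySem.List.pyRange (i - 1) 0 (-1)).map PySem.Int.toChars)
def pvRow (n i : Int) : String :=
  String.ofList (List.replicate (n - i).toNat ' ' ++ (pvL i ++ pvR i))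

theorem pvJoin_nil_flatten (l : List (List Char)) : PySem.Chars.join [] l = l.flatten := by
  simp only [PySem.Chars.join, List.intercalate]
  induction l with
  | nil => rfl
  | cons a t ih =>
    cases t with
    | nil => simp
    | cons b u => simpa [List.intersperse] using ih

theorem pvL_succ (m : Nat) : pvL ((m : Int) + 1) = pvL (m : Int) ++ PySem.Int.toChars ((m : Int) + 1) := by
  unfold pvL
  rw [show ((m : Int) + 1 + 1) = ((m : Int) + 1) + 1 from rfl,
      PySem.List.pyRange_one_succ_right (by omega : (1 : Int) ≤ (m : Int) + 1)]
  simp [pvJoin_nil_flatten]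

theorem pvR_succ (m : Nat) (hm : 0 < m) :
    pvR ((m : Int) + 1) = PySem.Int.toChars (m : Int) ++ pvR (m : Int) := by
  unfold pvR
  rw [show ((m : Int) + 1 - 1) = (m : Int) from by ring,
      PySem.List.pyRange_neg_one_cons (by exact_mod_cast hm : (0 : Int) < (m : Int))]
  simp [pvJoin_nil_flatten]

theorem pvA_eq_map (n : Int) :
    (PySem.List.pyRange 1 (n + 1) 1).foldl (pvAStep n) [] =
      (PySem.List.pyRange 1 (n + 1) 1).map (pvRow n) := by
  have h := PySem.List.foldl_append_singleton_eq_map (pvRow n) (PySem.List.pyRange 1 (n + 1) 1) []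
  simp only [List.nil_append] at h
  have hstep : pvAStep n = fun lines i => lines ++ [pvRow n i] := rfl
  rw [hstep, h]

-- B's loop invariant over the processed prefix 1..m
theorem pvB_inv (n : Int) (m : Nat) :
    (PySem.List.pyRange 1 ((m : Int) + 1) 1).foldl (pvBStep n) ([], [], []) =
      ((PySem.List.pyRange 1 ((m : Int) + 1) 1).map (pvRow n), pvL (m : Int), pvR ((m : Int) + 1)) := by
  induction m with
  | zero =>
    rw [PySem.List.pyRange_one_eq_nil (by norm_num)]
    have h1 : pvL ((0 : Nat) : Int) = [] := by
      unfold pvL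
      rw [PySem.List.pyRange_one_eq_nil (by norm_num)]
      rfl
    have h2 : pvR (((0 : Nat) : Int) + 1) = [] := by
      unfold pvR
      rw [show (((0 : Nat) : Int) + 1 - 1) = 0 from by norm_num,
          PySem.List.pyRange_neg_one_eq_nil (by norm_num)]
      rfl
    norm_num at h1 h2
    simp [h1, h2]
  | succ k ih =>
    have hsplit : PySem.List.pyRange 1 ((k : Int) + 1 + 1) 1 =
        PySem.List.pyRange 1 ((k : Int) + 1) 1 ++ [(k : Int) + 1] := by
      exact_mod_cast PySem.List.pyRange_one_succ_right (by omega : (1 : Int) ≤ (k : Int) + 1)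
    rw [show (((k + 1 : Nat) : Int) + 1) = ((k : Int) + 1 + 1) from by push_cast; ring, hsplit]
    rw [List.foldl_append, List.map_append, ih]
    simp only [pvBStep, List.foldl_cons, List.foldl_nil, List.map_cons, List.map_nil]
    have hL := pvL_succ k
    have hR := pvR_succ (k + 1) (Nat.succ_pos k)
    push_cast at hL hR
    refine Prod.ext ?_ (Prod.ext ?_ ?_)
    · simp [pvRow, hL, List.append_assoc]
    · simpa [show (((k+1:Nat) : Int)) = (k : Int) + 1 from by push_cast; ring] using hL.symm
    · simpa [show (((k+1:Nat) : Int)) = (k : Int) + 1 from by push_cast; ring] using hR.symm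

-- ===== VERDICT (by name: the statement is the Claim_ definition above) =====
theorem build_centered_pyramid_spec : Claim_equal_build_centered_pyramid := by
  intro n _
  unfold Spec_build_centered_pyramid build_centered_pyramid build_centered_pyramid_alt
  by_cases hn : n ≤ 0
  · rw [if_pos hn, PySem.List.pyRange_one_eq_nil (by omega)]
    rfl
  · rw [if_neg hn]
    have hm : n = ((n.toNat : Int)) := by omega
    rw [pvA_eq_map n]
    have := pvB_inv n n.toNat
    rw [show ((n.toNat : Int) + 1) = n + 1 from by omega] at this
    rw [this]
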